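-- pv_equiv track=rewrite | github.com/pypi-data/pypi-mirror-392 | packages/kn-dataset-tools/kn_dataset_tools-0.70.2.dev0.tar.gz/kn_dataset_tools-0.70.2.dev0/dataset_tools/vendored_sdpr/format/tensorart.py | _extract_prompts
-- ===== SOURCE A (Python) =====
-- from typing import Any
--
-- def _extract_prompts(workflow_data: dict[str, Any], analysis: dict[str, Any]) -> dict[str, str]:
--     """Extract positive and negative prompts from text encode nodes"""
--     prompts = {"positive": "", "negative": ""}
--
--     # Get text from all CLIPTextEncode nodes
--     text_nodes = {}
--     for node_id in analysis["text_encode_nodes"]: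
--         node_data = workflow_data.get(node_id, {})
--         inputs = node_data.get("inputs", {})
--         text = inputs.get("text", "")
--         if text:
--             text_nodes[node_id] = text
--
--     # Try to determine which is positive vs negative
--     # This is complex in ComfyUI - for now, use heuristics
--     if len(text_nodes) >= 2:
--         # Heuristic: longer text is usually positive
--         sorted_texts = sorted(text_nodes.items(), key=lambda x: len(x[1]), reverse=True)
--         prompts["positive"] = sorted_texts[0][1]
--         prompts["negative"] = sorted_texts[1][1]
--     elif len(text_nodes) == 1:
--         # Only one text node - assume positive
--         prompts["positive"] = list(text_nodes.values())[0]
--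
--     return prompts
-- ===== SOURCE B (Python) =====
-- from typing import Any
--
-- def _extract_prompts(workflow_data: dict[str, Any], analysis: dict[str, Any]) -> dict[str, str]:
--     """Extract positive and negative prompts from text encode nodes.
--
--     One forward pass keeping the two longest texts (stable top-2 selection)
--     instead of building a dict and fully sorting it.
--     """
--     best = None
--     second = None
--     seen = set()
--     for node_id in analysis["text_encode_nodes"]:
--         if node_id in seen:
--             continue
--         seen.add(node_id)
--         text = workflow_data.get(node_id, {}).get("inputs", {}).get("text", "")
--         if not text:
--             continue
--         if best is None or len(text) > len(best):
--             best, second = text, best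
--         elif second is None or len(text) > len(second):
--             second = text
--     return {"positive": best or "", "negative": second or ""}
-- ===== Notes on version B (the rewrite author's own statement) =====
-- stated objective: alternative
-- what changed: Replaces the dict-building pass plus full stable sort of all texts with a single forward scan that keeps only the two longest texts (stable top-2 selection with strict comparisons) and a seen-set for duplicate node ids.
import Mathlib
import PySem

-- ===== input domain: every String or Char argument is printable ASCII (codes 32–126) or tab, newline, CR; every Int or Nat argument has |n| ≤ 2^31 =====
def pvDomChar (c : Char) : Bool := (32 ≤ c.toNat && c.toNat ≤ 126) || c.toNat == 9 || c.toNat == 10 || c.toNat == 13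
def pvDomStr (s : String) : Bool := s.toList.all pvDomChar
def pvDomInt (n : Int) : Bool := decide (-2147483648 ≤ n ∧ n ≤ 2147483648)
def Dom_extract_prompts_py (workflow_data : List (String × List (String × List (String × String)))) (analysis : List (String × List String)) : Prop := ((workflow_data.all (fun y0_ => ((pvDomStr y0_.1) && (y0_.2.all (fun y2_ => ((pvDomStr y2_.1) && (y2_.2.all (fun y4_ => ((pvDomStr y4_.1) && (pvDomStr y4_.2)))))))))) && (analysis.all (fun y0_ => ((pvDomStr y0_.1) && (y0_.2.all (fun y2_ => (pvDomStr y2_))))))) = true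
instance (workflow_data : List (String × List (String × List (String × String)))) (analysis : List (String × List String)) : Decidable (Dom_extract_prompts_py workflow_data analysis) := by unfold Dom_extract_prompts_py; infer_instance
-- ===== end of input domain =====

-- B replaces A's dict-build + full stable sort by a single forward scan keeping the two
-- longest texts (strict comparisons preserve Python's stable tie-breaking).

-- ===== PORT A =====
-- workflow_data.get(node_id, {}).get("inputs", {}).get("text", "")  (shared by both Pythons verbatim)
def pvTextOf (workflow_data : List (String × List (String × List (String × String)))) (node_id : String) : String :=
  let node_data := (PySem.Dict.mk workflow_data).getD node_id []
  let inputs := (PySem.Dict.mk node_data).getD "inputs" []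
  (PySem.Dict.mk inputs).getD "text" ""

def extract_prompts_py (workflow_data : List (String × List (String × List (String × String)))) (analysis : List (String × List String)) : List (String × String) :=
  -- analysis["text_encode_nodes"]; Pre_ guarantees the key is present (Python raises KeyError otherwise)
  let nodes := (PySem.Dict.mk analysis).getD "text_encode_nodes" []
  let text_nodes := nodes.foldl (fun (d : PySem.Dict String String) node_id =>
      let text := pvTextOf workflow_data node_id
      if text ≠ "" then d.insert node_id text else d) PySem.Dict.empty
  if 2 ≤ text_nodes.size then
    let sorted_texts := PySem.List.sorted text_nodes.items (fun x => PySem.Str.len x.2) true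
    [("positive", (PySem.List.pyGetD sorted_texts 0 ("", "")).2),
     ("negative", (PySem.List.pyGetD sorted_texts 1 ("", "")).2)]
  else if text_nodes.size = 1 then
    [("positive", PySem.List.pyGetD text_nodes.values 0 ""), ("negative", "")]
  else
    [("positive", ""), ("negative", "")]

-- ===== PORT B =====
-- 'best is None or len(text) > len(best)'
def pvBeats (t : String) (cur : Option String) : Bool :=
  match cur with
  | none => true
  | some b => decide (PySem.Str.len b < PySem.Str.len t)

def extract_prompts_py_alt (workflow_data : List (String × List (String × List (String × String)))) (analysis : List (String × List String)) : List (String × String) :=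
  let nodes := (PySem.Dict.mk analysis).getD "text_encode_nodes" []
  let st := nodes.foldl (fun (st : PySem.Set String × Option String × Option String) node_id =>
      if st.1.contains node_id then st
      else
        let seen := st.1.add node_id
        let text := pvTextOf workflow_data node_id
        if text = "" then (seen, st.2.1, st.2.2)
        else if pvBeats text st.2.1 then (seen, some text, st.2.1)
        else if pvBeats text st.2.2 then (seen, st.2.1, some text)
        else (seen, st.2.1, st.2.2)) (PySem.Set.empty, none, none)
  [("positive", st.2.1.getD ""), ("negative", st.2.2.getD "")]

-- ===== PRECONDITION & SPEC =====
-- Pre_ excludes exactly the inputs on which A raises KeyError: analysis without the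
-- key "text_encode_nodes" (B raises there too).
def Pre_extract_prompts_py (workflow_data : List (String × List (String × List (String × String)))) (analysis : List (String × List String)) : Prop :=
  "text_encode_nodes" ∈ analysis.map Prod.fst
instance (workflow_data : List (String × List (String × List (String × String)))) (analysis : List (String × List String)) : Decidable (Pre_extract_prompts_py workflow_data analysis) := by unfold Pre_extract_prompts_py; infer_instance

def pvWitness_extract_prompts_py : (List (String × List (String × List (String × String)))) × (List (String × List String)) :=
  ([("7", [("inputs", [("text", "a cat")])])], [("text_encode_nodes", ["7"])])

def Spec_extract_prompts_py (workflow_data : List (String × List (String × List (String × String)))) (analysis : List (String × List String)) (out : List (String × String)) : Prop := out = extract_prompts_py_alt workflow_data analysis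
instance (workflow_data : List (String × List (String × List (String × String)))) (analysis : List (String × List String)) (out : List (String × String)) : Decidable (Spec_extract_prompts_py workflow_data analysis out) := by unfold Spec_extract_prompts_py; infer_instance

-- ===== CLAIM (what is proved, stated in full; the proofs are below) =====
def Claim_equal_extract_prompts_py : Prop := ∀ (workflow_data : List (String × List (String × List (String × String)))) (analysis : List (String × List String)), Dom_extract_prompts_py workflow_data analysis → Pre_extract_prompts_py workflow_data analysis → Spec_extract_prompts_py workflow_data analysis (extract_prompts_py workflow_data analysis)

-- ===== LEMMAS AND PROOFS =====

-- ghost: top-2 step, exactly B's update of (best, second)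
def pvG (bs : Option String × Option String) (t : String) : Option String × Option String :=
  if pvBeats t bs.1 then (some t, bs.1)
  else if pvBeats t bs.2 then (bs.1, some t)
  else bs

-- ghost: order-preserving dedup relative to an already-seen list
def pvDedupFrom (seen : List String) : List String → List String
  | [] => []
  | id :: rest => if id ∈ seen then pvDedupFrom seen rest else id :: pvDedupFrom (seen ++ [id]) rest

-- A's dict build: items are the (id, text) pairs over deduped ids with nonempty text
lemma pv_dict_items (wd : List (String × List (String × List (String × String))))
    (nodes S : List String) (d : PySem.Dict String String)
    (hS : S.Nodup)
    (hd : d.items = (S.filter (fun id => pvTextOf wd id ≠ "")).map (fun id => (id, pvTextOf wd id))) :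
    (nodes.foldl (fun (d : PySem.Dict String String) node_id =>
        let text := pvTextOf wd node_id
        if text ≠ "" then d.insert node_id text else d) d).items
      = ((S ++ pvDedupFrom S nodes).filter (fun id => pvTextOf wd id ≠ "")).map (fun id => (id, pvTextOf wd id)) := by
  induction nodes generalizing S d with
  | nil => simpa [pvDedupFrom] using hd
  | cons id rest ih =>
      have hkeys : d.keys = S.filter (fun id => pvTextOf wd id ≠ "") := by
        simp [PySem.Dict.keys, hd, List.map_map, Function.comp_def]
      simp only [List.foldl_cons, pvDedupFrom]
      by_cases hmem : id ∈ S
      · rw [if_pos hmem]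
        by_cases hp : pvTextOf wd id = ""
        · simpa [hp] using ih S d hS hd
        · have hcont : d.contains id = true := by
            rw [PySem.Dict.contains_eq_decide_mem_keys, hkeys]
            simp [List.mem_filter, hmem, hp]
          have hins : (d.insert id (pvTextOf wd id)).items
              = (S.filter (fun id => pvTextOf wd id ≠ "")).map (fun id => (id, pvTextOf wd id)) := by
            rw [PySem.Dict.items_insert_of_contains d _ hcont, hd, List.map_map]
            refine List.map_congr_left (fun j hj => ?_)
            by_cases hje : j = id
            · subst hje; simp
            · simp [Function.comp_def, hje]
          simpa [hp] using ih S (d.insert id (pvTextOf wd id)) hS hins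
      · rw [if_neg hmem]
        have hS' : (S ++ [id]).Nodup := by
          simp [List.nodup_append, hS]
          intro a ha hEq
          exact hmem (hEq ▸ ha)
        have hrw : S ++ id :: pvDedupFrom (S ++ [id]) rest = (S ++ [id]) ++ pvDedupFrom (S ++ [id]) rest := by
          simp
        by_cases hp : pvTextOf wd id = ""
        · have hd' : d.items = ((S ++ [id]).filter (fun id => pvTextOf wd id ≠ "")).map (fun id => (id, pvTextOf wd id)) := by
            simp [List.filter_append, hp, hd]
          rw [hrw]
          simpa [hp] using ih (S ++ [id]) d hS' hd'
        · have hcont : d.contains id = false := by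
            rw [PySem.Dict.contains_eq_decide_mem_keys, hkeys]
            simp [List.mem_filter, hmem]
          have hins : (d.insert id (pvTextOf wd id)).items
              = ((S ++ [id]).filter (fun id => pvTextOf wd id ≠ "")).map (fun id => (id, pvTextOf wd id)) := by
            rw [PySem.Dict.items_insert_of_not_contains d _ hcont, hd]
            simp [List.filter_append, hp]
          rw [hrw]
          simpa [hp] using ih (S ++ [id]) (d.insert id (pvTextOf wd id)) hS' hins

-- B's scan over nodes = top-2 fold over the deduped nonempty texts
lemma pv_scan (wd : List (String × List (String × List (String × String))))
    (nodes S : List String) (seen : PySem.Set String) (b s : Option String)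
    (hseen : ∀ id, seen.contains id = decide (id ∈ S)) :
    (nodes.foldl (fun (st : PySem.Set String × Option String × Option String) node_id =>
      if st.1.contains node_id then st
      else
        let seen := st.1.add node_id
        let text := pvTextOf wd node_id
        if text = "" then (seen, st.2.1, st.2.2)
        else if pvBeats text st.2.1 then (seen, some text, st.2.1)
        else if pvBeats text st.2.2 then (seen, st.2.1, some text)
        else (seen, st.2.1, st.2.2)) (seen, b, s)).2
      = (((pvDedupFrom S nodes).filter (fun id => pvTextOf wd id ≠ "")).map (pvTextOf wd)).foldl pvG (b, s) := by
  induction nodes generalizing S seen b s with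
  | nil => rfl
  | cons id rest ih =>
      simp only [List.foldl_cons, pvDedupFrom]
      by_cases hmem : id ∈ S
      · have hid : id ∈ seen := by
          have h := hseen id
          simpa [PySem.Set.contains, hmem] using h
        simpa [hid, hmem] using ih S seen b s hseen
      · have hmemiff : ∀ j, j ∈ seen ↔ j ∈ S := by
          intro j
          have h := hseen j
          simpa [PySem.Set.contains] using h
        have hid : id ∉ seen := fun h => hmem ((hmemiff id).1 h)
        have hadd : seen.add id = seen ++ [id] := by simp [PySem.Set.add, hid]
        have hseen' : ∀ j, (seen.add id).contains j = decide (j ∈ S ++ [id]) := by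
          intro j
          by_cases hj : j = id
          · subst hj; simp [hadd, PySem.Set.contains]
          · simp [hadd, PySem.Set.contains, hmemiff j, hj]
        by_cases hp : pvTextOf wd id = ""
        · simpa [hid, hp, hmem] using ih (S ++ [id]) (seen.add id) b s hseen'
        · by_cases h1 : pvBeats (pvTextOf wd id) b
          · simpa [hid, hp, hmem, pvG, h1] using ih (S ++ [id]) (seen.add id) (some (pvTextOf wd id)) b hseen'
          · by_cases h2 : pvBeats (pvTextOf wd id) s
            · simpa [hid, hp, hmem, pvG, h1, h2] using ih (S ++ [id]) (seen.add id) b (some (pvTextOf wd id)) hseen'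
            · simpa [hid, hp, hmem, pvG, h1, h2] using ih (S ++ [id]) (seen.add id) b s hseen'

-- insertBy commutes with taking second components (the key only looks at .2)
lemma pv_insertBy_map_snd (x : String × String) (l : List (String × String)) :
    (PySem.List.insertBy (fun a b => decide (PySem.Str.len b.2 < PySem.Str.len a.2)) x l).map Prod.snd
      = PySem.List.insertBy (fun a b => decide (PySem.Str.len b < PySem.Str.len a)) x.2 (l.map Prod.snd) := by
  induction l with
  | nil => rfl
  | cons a t ih =>
      simp only [PySem.List.insertBy, List.map_cons]
      simp [PySem.Str.len] at ih
      by_cases h : a.2.length < x.2.length <;> simp [PySem.Str.len, h, ih]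

lemma pv_foldl_insertBy_map_snd (items : List (String × String)) (acc : List (String × String)) :
    (items.foldl (fun acc x => PySem.List.insertBy (fun a b => decide (PySem.Str.len b.2 < PySem.Str.len a.2)) x acc) acc).map Prod.snd
      = (items.map Prod.snd).foldl (fun acc x => PySem.List.insertBy (fun a b => decide (PySem.Str.len b < PySem.Str.len a)) x acc) (acc.map Prod.snd) := by
  induction items generalizing acc with
  | nil => rfl
  | cons p t ih => simp only [List.foldl_cons, List.map_cons, ih, pv_insertBy_map_snd]

-- the top-2 fold reads off the first two elements of the insertion sort
lemma pv_top2 (ts l : List String) :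
    ts.foldl pvG (l[0]?, l[1]?)
      = ((ts.foldl (fun acc x => PySem.List.insertBy (fun a b => decide (PySem.Str.len b < PySem.Str.len a)) x acc) l)[0]?,
         (ts.foldl (fun acc x => PySem.List.insertBy (fun a b => decide (PySem.Str.len b < PySem.Str.len a)) x acc) l)[1]?) := by
  induction ts generalizing l with
  | nil => rfl
  | cons t rest ih =>
      have hstep : pvG (l[0]?, l[1]?) t
          = ((PySem.List.insertBy (fun a b => decide (PySem.Str.len b < PySem.Str.len a)) t l)[0]?,
             (PySem.List.insertBy (fun a b => decide (PySem.Str.len b < PySem.Str.len a)) t l)[1]?) := by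
        match l with
        | [] => rfl
        | [a] =>
            by_cases h : a.length < t.length <;>
              simp [pvG, pvBeats, PySem.List.insertBy, h]
        | a :: c :: r =>
            by_cases h : a.length < t.length
            · simp [pvG, pvBeats, PySem.List.insertBy, h]
            · by_cases h2 : c.length < t.length <;>
                simp [pvG, pvBeats, PySem.List.insertBy, h, h2]
      simp only [List.foldl_cons, hstep, ih]

-- both bodies agree for any node list
lemma pv_main (wd : List (String × List (String × List (String × String)))) (nodes : List String) :
    (let text_nodes := nodes.foldl (fun (d : PySem.Dict String String) node_id =>
        let text := pvTextOf wd node_id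
        if text ≠ "" then d.insert node_id text else d) PySem.Dict.empty
     if 2 ≤ text_nodes.size then
       let sorted_texts := PySem.List.sorted text_nodes.items (fun x => PySem.Str.len x.2) true
       [("positive", (PySem.List.pyGetD sorted_texts 0 ("", "")).2),
        ("negative", (PySem.List.pyGetD sorted_texts 1 ("", "")).2)]
     else if text_nodes.size = 1 then
       [("positive", PySem.List.pyGetD text_nodes.values 0 ""), ("negative", "")]
     else
       [("positive", ""), ("negative", "")])
    = (let st := nodes.foldl (fun (st : PySem.Set String × Option String × Option String) node_id =>
          if st.1.contains node_id then st
          else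
            let seen := st.1.add node_id
            let text := pvTextOf wd node_id
            if text = "" then (seen, st.2.1, st.2.2)
            else if pvBeats text st.2.1 then (seen, some text, st.2.1)
            else if pvBeats text st.2.2 then (seen, st.2.1, some text)
            else (seen, st.2.1, st.2.2)) (PySem.Set.empty, none, none)
       [("positive", st.2.1.getD ""), ("negative", st.2.2.getD "")]) := by
  have hA := pv_dict_items wd nodes [] PySem.Dict.empty List.nodup_nil (by rfl)
  have hB := pv_scan wd nodes [] PySem.Set.empty none none (by intro id; rfl)
  simp only [List.nil_append] at hA
  set L := (pvDedupFrom [] nodes).filter (fun id => pvTextOf wd id ≠ "") with hL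
  set st := PySem.List.sorted (L.map (fun id => (id, pvTextOf wd id))) (fun x => PySem.Str.len x.2) true with hst
  have hlen : st.length = L.length := by
    rw [hst, PySem.List.length_sorted, List.length_map]
  have hbs : (L.map (pvTextOf wd)).foldl pvG (none, none) = (st[0]?.map Prod.snd, st[1]?.map Prod.snd) := by
    have h1 : L.map (pvTextOf wd) = (L.map (fun id => (id, pvTextOf wd id))).map Prod.snd := by
      simp [List.map_map, Function.comp_def]
    have h2 : ((L.map (fun id => (id, pvTextOf wd id))).foldl
        (fun acc x => PySem.List.insertBy (fun a b => decide (PySem.Str.len b.2 < PySem.Str.len a.2)) x acc) []).map Prod.snd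
        = ((L.map (fun id => (id, pvTextOf wd id))).map Prod.snd).foldl
            (fun acc x => PySem.List.insertBy (fun a b => decide (PySem.Str.len b < PySem.Str.len a)) x acc) [] :=
      pv_foldl_insertBy_map_snd _ []
    have h3 := pv_top2 (L.map (pvTextOf wd)) []
    simp only [List.getElem?_nil] at h3
    rw [← h1] at h2
    rw [h3, ← h2, hst, PySem.List.sorted_rev_eq_foldl_insertBy, List.getElem?_map, List.getElem?_map]
  simp only [hA, hB, hbs, ← hL, ← hst, PySem.Dict.size, PySem.Dict.values, List.length_map]
  by_cases h2 : 2 ≤ L.length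
  · have h0' : (0 : Int) < (st.length : Int) := by rw [hlen]; exact_mod_cast Nat.lt_of_lt_of_le Nat.zero_lt_two h2
    have h1' : (1 : Int) < (st.length : Int) := by rw [hlen]; exact_mod_cast Nat.lt_of_lt_of_le Nat.one_lt_two h2
    rw [if_pos h2, PySem.List.pyGetD_eq_getElem st ("", "") (by norm_num) h0',
        PySem.List.pyGetD_eq_getElem st ("", "") (by norm_num) h1']
    have hg0 : st[0]? = some st[(0 : Int).toNat] :=
      List.getElem?_eq_getElem (by rw [hlen]; omega)
    have hg1 : st[1]? = some st[(1 : Int).toNat] :=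
      List.getElem?_eq_getElem (by rw [hlen]; omega)
    simp [hg0, hg1]
  · rw [if_neg h2]
    by_cases h1 : L.length = 1
    · rw [if_pos h1]
      obtain ⟨a, hLa⟩ := List.length_eq_one_iff.mp h1
      have hstp : st = [(a, pvTextOf wd a)] := by
        apply List.perm_singleton.mp
        rw [hst, hLa]
        exact PySem.List.sorted_perm _ _ _
      simp [hstp, hLa, PySem.List.pyGetD_zero]
    · rw [if_neg h1]
      have hL0 : L.length = 0 := by omega
      have hst0 : st = [] := by
        have := hlen
        rw [hL0] at this
        exact List.length_eq_zero_iff.mp this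
      simp [hst0]

-- ===== VERDICT (by name: the statement is the Claim_ definition above) =====
theorem extract_prompts_py_spec : Claim_equal_extract_prompts_py := by
  intro wd an _ _
  show extract_prompts_py wd an = extract_prompts_py_alt wd an
  exact pv_main wd ((PySem.Dict.mk an).getD "text_encode_nodes" [])
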